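-- pv_equiv track=rewrite | github.com/jose-cantu/MicroSeq | src/microseq_tests/trimming/biopy_trim.py | _mott_trim_bounds
-- ===== SOURCE A (Python) =====
-- def _mott_trim_bounds(quals: list[int], cutoff_q: int = 20) -> tuple[int, int] | None:
--     if not quals:
--         return None
--
--     def _best_interval(scores: list[float]) -> tuple[int, int] | None:
--         best_sum = float("-inf")
--         best_start = best_end = -1
--         cur_sum = 0.0
--         cur_start = 0
--         for i, val in enumerate(scores):
--             if cur_sum <= 0:
--                 cur_start = i
--                 cur_sum = val
--             else:
--                 cur_sum += val
--             if cur_sum > best_sum: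
--                 best_sum = cur_sum
--                 best_start = cur_start
--                 best_end = i + 1
--         if best_sum <= 0 or best_start < 0:
--             return None
--         return best_start, best_end
--
--     scores = [q - cutoff_q for q in quals]
--     best = _best_interval(scores)
--     if best is None:
--         return None
--     return best
-- ===== SOURCE B (Python) =====
-- def _mott_trim_bounds(quals: list[int], cutoff_q: int = 20) -> tuple[int, int] | None:
--     if not quals:
--         return None
--     # forward pass: for each end k+1, the candidate triple (sum, start, end) of
--     # the max-sum interval ending there (start = latest minimal prefix index)
--     cands = []
--     s = minv = mini = 0
--     for k, q in enumerate(quals):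
--         if s <= minv:
--             minv, mini = s, k
--         s += q - cutoff_q
--         cands.append((s - minv, mini, k + 1))
--     # backward pass over the reversed list: keep the best, earliest end wins ties
--     best = None
--     for c in reversed(cands):
--         if best is None or best[0] <= c[0]:
--             best = c
--     if best[0] <= 0:
--         return None
--     return best[1], best[2]
-- ===== Notes on version B (the rewrite author's own statement) =====
-- stated objective: alternative
-- what changed: Replaced A's single Kadane accumulator loop by two staged passes: a forward pass that materializes an explicit per-end candidate list (interval sum, latest-minimal-prefix start, end), then a backward pass over the reversed candidate list that selects the best candidate with earliest end winning ties.
import Mathlib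
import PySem

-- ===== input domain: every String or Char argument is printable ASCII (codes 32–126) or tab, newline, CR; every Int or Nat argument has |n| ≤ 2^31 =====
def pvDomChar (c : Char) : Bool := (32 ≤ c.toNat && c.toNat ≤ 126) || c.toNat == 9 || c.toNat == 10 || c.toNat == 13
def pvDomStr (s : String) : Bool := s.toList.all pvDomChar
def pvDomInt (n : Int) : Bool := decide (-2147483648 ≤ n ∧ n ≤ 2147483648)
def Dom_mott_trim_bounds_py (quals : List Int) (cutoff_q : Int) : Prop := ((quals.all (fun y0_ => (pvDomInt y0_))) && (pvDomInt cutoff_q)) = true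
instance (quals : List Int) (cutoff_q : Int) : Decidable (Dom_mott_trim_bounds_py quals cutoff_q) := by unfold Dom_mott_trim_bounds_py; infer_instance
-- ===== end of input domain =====

-- B replaces A's single Kadane accumulator loop by two staged passes: a forward pass
-- materializing an explicit per-end candidate list, then a backward pass over the
-- reversed list picking the best candidate (same O(n) cost, different decomposition).

-- ===== PORT A =====
-- Kadane loop body: state = (best_sum (none = -inf), best_start, best_end, cur_sum, cur_start), input = (i, val)
def mottBodyA (acc : Option Int × Int × Int × Int × Int) (iv : Int × Int) :
    Option Int × Int × Int × Int × Int :=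
  let (bS, bStart, bEnd, cSum, cStart) := acc
  let (cSum, cStart) := if cSum ≤ 0 then (iv.2, iv.1) else (cSum + iv.2, cStart)
  let upd := match bS with | none => true | some b => decide (b < cSum)
  if upd then (some cSum, cStart, iv.1 + 1, cSum, cStart) else (bS, bStart, bEnd, cSum, cStart)

def mott_trim_bounds_py (quals : List Int) (cutoff_q : Int) : Option (Int × Int) :=
  if quals = [] then none
  else
    let scores := quals.map (fun q => q - cutoff_q)
    let st := (PySem.List.enumerate scores 0).foldl mottBodyA (none, -1, -1, 0, 0)
    match st.1 with
    | none => none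
    | some b => if b ≤ 0 ∨ st.2.1 < 0 then none else some (st.2.1, st.2.2.1)

-- ===== PORT B =====
-- forward pass (Source B's first loop): builds the candidate list; args k s minv mini
def mottCandsB (c : Int) : Int → Int → Int → Int → List Int → List (Int × Int × Int)
  | _, _, _, _, [] => []
  | k, s, minv, mini, q :: qs =>
    let (minv, mini) := if s ≤ minv then (s, k) else (minv, mini)
    let s := s + q - c
    (s - minv, mini, k + 1) :: mottCandsB c (k + 1) s minv mini qs

-- backward pass body (Source B's second loop, over the reversed candidate list)
def mottPickStep (best : Option (Int × Int × Int)) (cnd : Int × Int × Int) :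
    Option (Int × Int × Int) :=
  match best with
  | none => some cnd
  | some b => if b.1 ≤ cnd.1 then some cnd else some b

def mott_trim_bounds_py_alt (quals : List Int) (cutoff_q : Int) : Option (Int × Int) :=
  if quals = [] then none
  else
    let cands := mottCandsB cutoff_q 0 0 0 0 quals
    match cands.reverse.foldl mottPickStep none with
    | none => none   -- unreachable (cands nonempty); totality guard for Python's best[0]
    | some b => if b.1 ≤ 0 then none else some (b.2.1, b.2.2)

-- ===== PRECONDITION & SPEC =====
def Spec_mott_trim_bounds_py (quals : List Int) (cutoff_q : Int) (out : Option (Int × Int)) : Prop := out = mott_trim_bounds_py_alt quals cutoff_q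
instance (quals : List Int) (cutoff_q : Int) (out : Option (Int × Int)) : Decidable (Spec_mott_trim_bounds_py quals cutoff_q out) := by unfold Spec_mott_trim_bounds_py; infer_instance

-- ===== CLAIM (what is proved, stated in full; the proofs are below) =====
def Claim_equal_mott_trim_bounds_py : Prop := ∀ (quals : List Int) (cutoff_q : Int), Dom_mott_trim_bounds_py quals cutoff_q → Spec_mott_trim_bounds_py quals cutoff_q (mott_trim_bounds_py quals cutoff_q)

-- ===== LEMMAS AND PROOFS =====

-- the (best_sum, best_start, best_end) summary of A's fold state
def stBest (st : Option Int × Int × Int × Int × Int) : Option (Int × Int × Int) :=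
  st.1.map (fun b => (b, st.2.1, st.2.2.1))

-- recursive form of the backward pass (foldr over the unreversed candidate list)
def mottPick : List (Int × Int × Int) → Option (Int × Int × Int)
  | [] => none
  | c :: cs => mottPickStep (mottPick cs) c

theorem mottPick_eq_foldr (l : List (Int × Int × Int)) :
    l.foldr (fun x y => mottPickStep y x) none = mottPick l := by
  induction l with
  | nil => rfl
  | cons c cs ih => simp [mottPick, ih]

-- merge a current best (kept on ties) with the best of the rest
def mottMerge (cur rest : Option (Int × Int × Int)) : Option (Int × Int × Int) :=
  match cur, rest with
  | none, r => r
  | some c, none => some c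
  | some c, some r => if c.1 < r.1 then some r else some c

def mottUpd (cur : Option (Int × Int × Int)) (C : Int × Int × Int) :
    Option (Int × Int × Int) :=
  match cur with
  | none => some C
  | some b => if b.1 < C.1 then some C else some b

theorem mottMerge_step (B : Option (Int × Int × Int)) (C : Int × Int × Int)
    (R : Option (Int × Int × Int)) :
    mottMerge B (mottPickStep R C) = mottMerge (mottUpd B C) R := by
  rcases B with _ | b <;> rcases R with _ | r <;>
    simp only [mottMerge, mottPickStep, mottUpd] <;>
    split_ifs <;> (try simp only [mottMerge]) <;> (try split_ifs) <;>
    first | rfl | (exfalso; omega)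

-- main bridge: A's Kadane fold equals merging the accumulated best with B's picked candidate
theorem mottMain : ∀ (qs : List Int) (c k s minv mini : Int) (bS : Option Int)
    (bStart bEnd : Int),
    stBest ((PySem.List.enumerate (qs.map (fun q => q - c)) k).foldl mottBodyA
        (bS, bStart, bEnd, s - minv, mini))
    = mottMerge (bS.map (fun b => (b, bStart, bEnd)))
        (mottPick (mottCandsB c k s minv mini qs)) := by
  intro qs
  induction qs with
  | nil =>
      intro c k s minv mini bS bStart bEnd
      rcases bS with _ | b <;>
        simp [stBest, mottCandsB, mottPick, mottMerge, PySem.List.enumerate_nil]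
  | cons q qs ih =>
      intro c k s minv mini bS bStart bEnd
      simp only [List.map_cons, PySem.List.enumerate_cons, List.foldl_cons, mottCandsB,
        mottPick]
      by_cases h : s ≤ minv
      · simp only [h, if_true]
        rw [mottMerge_step]
        simp only [mottBodyA]
        rw [if_pos (show s - minv ≤ 0 by omega),
          show q - c = s + q - c - s from by ring]
        rcases bS with _ | b
        · exact (ih c (k + 1) (s + q - c) s k (some (s + q - c - s)) k (k + 1)).trans rfl
        · by_cases hb : b < s + q - c - s
          · simp only [hb, decide_true, if_true, Option.map_some, mottUpd]
            exact (ih c (k + 1) (s + q - c) s k (some (s + q - c - s)) k (k + 1)).trans rfl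
          · simp only [hb, decide_false, Bool.false_eq_true, if_false, Option.map_some, mottUpd]
            exact (ih c (k + 1) (s + q - c) s k (some b) bStart bEnd).trans rfl
      · simp only [h, if_false]
        rw [mottMerge_step]
        simp only [mottBodyA]
        rw [if_neg (show ¬ s - minv ≤ 0 by omega),
          show s - minv + (q - c) = s + q - c - minv from by ring]
        rcases bS with _ | b
        · exact (ih c (k + 1) (s + q - c) minv mini (some (s + q - c - minv)) mini (k + 1)).trans rfl
        · by_cases hb : b < s + q - c - minv
          · simp only [hb, decide_true, if_true, Option.map_some, mottUpd]
            exact (ih c (k + 1) (s + q - c) minv mini (some (s + q - c - minv)) mini (k + 1)).trans rfl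
          · simp only [hb, decide_false, Bool.false_eq_true, if_false, Option.map_some, mottUpd]
            exact (ih c (k + 1) (s + q - c) minv mini (some b) bStart bEnd).trans rfl

-- every picked candidate's start is ≥ 0 when the indices start ≥ 0
theorem mottPick_start_nonneg : ∀ (qs : List Int) (c k s minv mini : Int),
    0 ≤ mini → 0 ≤ k → ∀ t, mottPick (mottCandsB c k s minv mini qs) = some t → 0 ≤ t.2.1 := by
  intro qs
  induction qs with
  | nil => intro c k s minv mini _ _ t h; simp [mottCandsB, mottPick] at h
  | cons q qs ih =>
      intro c k s minv mini hm hk t h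
      simp only [mottCandsB, mottPick] at h
      by_cases hs : s ≤ minv
      · simp only [hs, if_true] at h
        rcases hR : mottPick (mottCandsB c (k + 1) (s + q - c) s k qs) with _ | r
        · rw [hR] at h; simp only [mottPickStep] at h
          cases h; simpa using hk
        · rw [hR] at h; simp only [mottPickStep] at h
          have hr := ih c (k + 1) (s + q - c) s k hk (by omega) r hR
          split_ifs at h <;> cases h
          · simpa using hk
          · exact hr
      · simp only [hs, if_false] at h
        rcases hR : mottPick (mottCandsB c (k + 1) (s + q - c) minv mini qs) with _ | r
        · rw [hR] at h; simp only [mottPickStep] at h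
          cases h; simpa using hm
        · rw [hR] at h; simp only [mottPickStep] at h
          have hr := ih c (k + 1) (s + q - c) minv mini hm (by omega) r hR
          split_ifs at h <;> cases h
          · simpa using hm
          · exact hr

-- ===== VERDICT (by name: the statement is the Claim_ definition above) =====
theorem mott_trim_bounds_py_spec : Claim_equal_mott_trim_bounds_py := by
  intro quals cutoff_q _
  unfold Spec_mott_trim_bounds_py mott_trim_bounds_py mott_trim_bounds_py_alt
  by_cases hq : quals = []
  · simp [hq]
  · simp only [hq, if_false]
    rw [List.foldl_reverse, mottPick_eq_foldr]
    have h := mottMain quals cutoff_q 0 0 0 0 none (-1) (-1)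
    simp only [sub_zero, Option.map_none, stBest] at h
    set a := (PySem.List.enumerate (quals.map (fun q => q - cutoff_q)) 0).foldl mottBodyA
      (none, -1, -1, 0, 0) with ha
    rcases hP : mottPick (mottCandsB cutoff_q 0 0 0 0 quals) with _ | t
    · rw [hP] at h
      simp only [mottMerge] at h
      have h0 : a.1 = none := by
        rcases h1 : a.1 with _ | b
        · rfl
        · rw [h1] at h; simp at h
      rw [h0]
    · rw [hP] at h
      simp only [mottMerge] at h
      rcases h1 : a.1 with _ | b
      · rw [h1] at h; simp at h
      · rw [h1] at h
        simp only [Option.map_some, Option.some_inj] at h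
        have hst : a.2.1 = t.2.1 := by
          have := congrArg (fun p : Int × Int × Int => p.2.1) h; simpa using this
        have hen : a.2.2.1 = t.2.2 := by
          have := congrArg (fun p : Int × Int × Int => p.2.2) h; simpa using this
        have hbv : b = t.1 := by
          have := congrArg (fun p : Int × Int × Int => p.1) h; simpa using this
        have hnn : 0 ≤ t.2.1 :=
          mottPick_start_nonneg quals cutoff_q 0 0 0 0 le_rfl le_rfl t hP
        rw [hbv, hst, hen]
        by_cases hb0 : t.1 ≤ 0
        · simp [hb0]
        · simp [hb0, show ¬ t.2.1 < 0 from by omega]
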